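-- pv_equiv track=rewrite | github.com/sizovaj95/data_analysis | descriptions_analysis.py | _split_by_pos_tag
-- ===== SOURCE A (Python) =====
-- from typing import List, Tuple, Dict, Optional
--
-- TAGGED_WORDS = List[Tuple[str, str]]
--
-- def _split_by_pos_tag(tagged_words: TAGGED_WORDS, splitting_tag: str) -> Tuple[TAGGED_WORDS, TAGGED_WORDS]:
--     before_tag = []
--     after_tag = []
--     tag_found = False
--     for word, tag in tagged_words:
--         if tag == splitting_tag:
--             tag_found = True
--             continue
--         if not tag_found:
--             before_tag.append((word, tag))
--         else:
--             after_tag.append((word, tag))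
--     return before_tag, after_tag
-- ===== SOURCE B (Python) =====
-- from typing import List, Tuple
--
-- TAGGED_WORDS = List[Tuple[str, str]]
--
-- def _split_by_pos_tag(tagged_words: TAGGED_WORDS, splitting_tag: str) -> Tuple[TAGGED_WORDS, TAGGED_WORDS]:
--     idx = next((i for i, (_, t) in enumerate(tagged_words) if t == splitting_tag), None)
--     if idx is None:
--         return list(tagged_words), []
--     return (list(tagged_words[:idx]),
--             [(w, t) for w, t in tagged_words[idx + 1:] if t != splitting_tag])
-- ===== Notes on version B (the rewrite author's own statement) =====
-- stated objective: simpler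
-- what changed: Replaces the single stateful flag-carrying loop with a find-then-slice/filter decomposition: locate the first matching tag, slice before it, and filter later matching tags out of the tail.
import Mathlib
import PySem

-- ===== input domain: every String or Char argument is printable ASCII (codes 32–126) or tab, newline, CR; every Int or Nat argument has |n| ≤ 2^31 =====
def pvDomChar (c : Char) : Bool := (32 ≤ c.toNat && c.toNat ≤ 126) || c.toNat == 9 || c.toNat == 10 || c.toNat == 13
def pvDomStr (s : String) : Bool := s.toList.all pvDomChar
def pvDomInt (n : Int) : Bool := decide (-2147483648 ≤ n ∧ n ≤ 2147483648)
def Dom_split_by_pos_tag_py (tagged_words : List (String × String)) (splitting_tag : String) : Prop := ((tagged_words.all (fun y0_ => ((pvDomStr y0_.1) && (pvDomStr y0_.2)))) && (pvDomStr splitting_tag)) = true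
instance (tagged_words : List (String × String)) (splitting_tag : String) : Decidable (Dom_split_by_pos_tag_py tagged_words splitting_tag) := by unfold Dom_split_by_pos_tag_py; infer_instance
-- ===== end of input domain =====

-- ===== PORT A =====
-- B: find-then-slice/filter decomposition instead of A's flag-carrying loop (objective: simpler); return values only, no mutation involved.
-- the for-loop of A as structural recursion over the same state (before, after, tag_found)
def pvLoopA : List (String × String) → List (String × String) → List (String × String) → Bool → String → (List (String × String)) × (List (String × String))
  | [], before_tag, after_tag, _, _ => (before_tag, after_tag)
  | (word, tag) :: rest, before_tag, after_tag, tag_found, splitting_tag =>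
    if tag == splitting_tag then
      pvLoopA rest before_tag after_tag true splitting_tag
    else if !tag_found then
      pvLoopA rest (before_tag ++ [(word, tag)]) after_tag tag_found splitting_tag
    else
      pvLoopA rest before_tag (after_tag ++ [(word, tag)]) tag_found splitting_tag

def split_by_pos_tag_py (tagged_words : List (String × String)) (splitting_tag : String) : (List (String × String)) × (List (String × String)) :=
  pvLoopA tagged_words [] [] false splitting_tag

-- ===== PORT B =====
-- next((i for i,(_,t) in enumerate(...) if t == splitting_tag), None) → List.findIdx?;
-- the nonnegative slices [:idx] and [idx+1:] are exactly take/drop.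
def split_by_pos_tag_py_alt (tagged_words : List (String × String)) (splitting_tag : String) : (List (String × String)) × (List (String × String)) :=
  match tagged_words.findIdx? (fun p => p.2 == splitting_tag) with
  | none => (tagged_words, [])
  | some i => (tagged_words.take i,
      (tagged_words.drop (i + 1)).filter (fun p => p.2 != splitting_tag))

-- ===== PRECONDITION & SPEC =====
def Spec_split_by_pos_tag_py (tagged_words : List (String × String)) (splitting_tag : String) (out : (List (String × String)) × (List (String × String))) : Prop := out = split_by_pos_tag_py_alt tagged_words splitting_tag
instance (tagged_words : List (String × String)) (splitting_tag : String) (out : (List (String × String)) × (List (String × String))) : Decidable (Spec_split_by_pos_tag_py tagged_words splitting_tag out) := by unfold Spec_split_by_pos_tag_py; infer_instance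

-- ===== CLAIM (what is proved, stated in full; the proofs are below) =====
def Claim_equal_split_by_pos_tag_py : Prop := ∀ (tagged_words : List (String × String)) (splitting_tag : String), Dom_split_by_pos_tag_py tagged_words splitting_tag → Spec_split_by_pos_tag_py tagged_words splitting_tag (split_by_pos_tag_py tagged_words splitting_tag)

-- ===== LEMMAS AND PROOFS =====

-- ===== VERDICT (by name: the statement is the Claim_ definition above) =====
-- after the tag has been found, the loop just filters out further matching tags
theorem pvLoopA_found (tw : List (String × String)) (b a : List (String × String)) (tag : String) :
    pvLoopA tw b a true tag = (b, a ++ tw.filter (fun p => p.2 != tag)) := by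
  induction tw generalizing a with
  | nil => simp [pvLoopA]
  | cons hd tl ih =>
    obtain ⟨w, t⟩ := hd
    by_cases h : t == tag
    · simp only [pvLoopA, h, if_true, ih]
      simp [List.filter, bne, h]
    · simp only [pvLoopA, h, Bool.not_true, ih, List.filter]
      simp [h, bne]

-- before the tag has been found, the loop implements find-then-slice/filter
theorem pvLoopA_notfound (tw : List (String × String)) (b : List (String × String)) (tag : String) :
    pvLoopA tw b [] false tag =
      (b ++ (split_by_pos_tag_py_alt tw tag).1, (split_by_pos_tag_py_alt tw tag).2) := by
  induction tw generalizing b with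
  | nil => simp [pvLoopA, split_by_pos_tag_py_alt]
  | cons hd tl ih =>
    obtain ⟨w, t⟩ := hd
    by_cases h : t == tag
    · simp [pvLoopA, h, pvLoopA_found, split_by_pos_tag_py_alt, List.findIdx?_cons]
    · simp only [pvLoopA, h, Bool.not_false, if_true, ih]
      simp only [split_by_pos_tag_py_alt, List.findIdx?_cons, h]
      cases hfi : tl.findIdx? (fun p => p.2 == tag) with
      | none => simp
      | some i => simp [List.take_succ_cons]

theorem split_by_pos_tag_py_spec : Claim_equal_split_by_pos_tag_py := by
  intro tw tag _
  unfold Spec_split_by_pos_tag_py split_by_pos_tag_py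
  rw [pvLoopA_notfound]
  simp
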